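-- pv_equiv track=rewrite | github.com/sanderslab/psychcore-compute-platform | rkstr8/conf.py | calculate_max_cpus
-- ===== SOURCE A (Python) =====
-- def calculate_max_cpus(num_samples, mode):
--     '''
--     Calculate the max number of CPUs for the compute environment
--     based on the number of samples.
--     :param num_samples: Int
--     :return: max_cpus: Int
--     '''
--     if mode == 'prod':
--         instance_num_vcpus = [
--             ('c5.9xlarge', 36, 'multi'),
--             ('c5.18xlarge', 72, 'single'),
--             ('r4.2xlarge', 8, 'multi'),
--             ('r4.4xlarge', 16, 'single')]
--     elif mode == 'test':
--         instance_num_vcpus = [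
--             ('c5.2xlarge', 8, 'multi'),
--             ('r4.xlarge', 4, 'multi'),
--             ('r4.4xlarge', 16, 'single')]
--     else:
--         raise ValueError('Invalid mode!')
--     max_cpus = 0
--     for inst in instance_num_vcpus:
--         if inst[2] == 'multi':
--             max_cpus += num_samples * inst[1]
--         elif inst[2] == 'single':
--             max_cpus += 1
--     return max_cpus
-- ===== SOURCE B (Python) =====
-- def calculate_max_cpus(num_samples, mode):
--     '''Closed form: 44 = 36+8 (prod multi vcpus), 2 singles; 12 = 8+4 (test), 1 single.'''
--     if mode == 'prod':
--         return 44 * num_samples + 2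
--     if mode == 'test':
--         return 12 * num_samples + 1
--     raise ValueError('Invalid mode!')
-- ===== Notes on version B (the rewrite author's own statement) =====
-- stated objective: simpler
-- what changed: Replaces the instance-table construction and accumulation loop with a direct closed-form formula per mode (44*n+2 for prod, 12*n+1 for test).
import Mathlib
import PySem

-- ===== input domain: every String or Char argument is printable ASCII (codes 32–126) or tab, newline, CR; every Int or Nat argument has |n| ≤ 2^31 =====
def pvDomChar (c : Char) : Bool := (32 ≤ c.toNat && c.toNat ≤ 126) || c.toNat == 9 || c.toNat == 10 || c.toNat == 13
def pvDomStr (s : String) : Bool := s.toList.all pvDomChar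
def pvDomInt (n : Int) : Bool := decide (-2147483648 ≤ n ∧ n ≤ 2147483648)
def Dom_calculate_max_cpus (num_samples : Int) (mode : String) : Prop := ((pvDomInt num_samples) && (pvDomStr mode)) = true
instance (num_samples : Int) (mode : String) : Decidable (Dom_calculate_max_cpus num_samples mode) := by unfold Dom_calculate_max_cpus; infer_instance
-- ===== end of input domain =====

-- B replaces A's instance table and accumulation loop with a closed-form formula per mode.

-- ===== PORT A =====
-- the per-mode instance tables, as in A
def pvTableProd : List (String × Int × String) :=
  [("c5.9xlarge", 36, "multi"), ("c5.18xlarge", 72, "single"),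
   ("r4.2xlarge", 8, "multi"), ("r4.4xlarge", 16, "single")]

def pvTableTest : List (String × Int × String) :=
  [("c5.2xlarge", 8, "multi"), ("r4.xlarge", 4, "multi"), ("r4.4xlarge", 16, "single")]

def calculate_max_cpus (num_samples : Int) (mode : String) : Int :=
  let instance_num_vcpus := if mode = "prod" then pvTableProd else pvTableTest
  instance_num_vcpus.foldl (fun max_cpus inst =>
    if inst.2.2 = "multi" then max_cpus + num_samples * inst.2.1
    else if inst.2.2 = "single" then max_cpus + 1
    else max_cpus) 0

-- ===== PORT B =====
def calculate_max_cpus_alt (num_samples : Int) (mode : String) : Int :=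
  if mode = "prod" then 44 * num_samples + 2
  else 12 * num_samples + 1

-- ===== PRECONDITION & SPEC =====
-- Pre_ excludes the inputs on which A raises ValueError('Invalid mode!'): any mode other than 'prod' or 'test'.
def Pre_calculate_max_cpus (num_samples : Int) (mode : String) : Prop := mode = "prod" ∨ mode = "test"
instance (num_samples : Int) (mode : String) : Decidable (Pre_calculate_max_cpus num_samples mode) := by unfold Pre_calculate_max_cpus; infer_instance
def pvWitness_calculate_max_cpus : Int × String := (3, "prod")

def Spec_calculate_max_cpus (num_samples : Int) (mode : String) (out : Int) : Prop := out = calculate_max_cpus_alt num_samples mode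
instance (num_samples : Int) (mode : String) (out : Int) : Decidable (Spec_calculate_max_cpus num_samples mode out) := by unfold Spec_calculate_max_cpus; infer_instance

-- ===== CLAIM (what is proved, stated in full; the proofs are below) =====
def Claim_equal_calculate_max_cpus : Prop := ∀ (num_samples : Int) (mode : String), Dom_calculate_max_cpus num_samples mode → Pre_calculate_max_cpus num_samples mode → Spec_calculate_max_cpus num_samples mode (calculate_max_cpus num_samples mode)

-- ===== LEMMAS AND PROOFS =====

-- ===== VERDICT (by name: the statement is the Claim_ definition above) =====
theorem calculate_max_cpus_spec : Claim_equal_calculate_max_cpus := by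
  intro n mode _ hpre
  rcases hpre with h | h <;> subst h <;>
    simp [Spec_calculate_max_cpus, calculate_max_cpus, calculate_max_cpus_alt,
      pvTableProd, pvTableTest, List.foldl] <;> ring
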